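-- pv_equiv track=rewrite | github.com/HuBohong/cp1404practicals | prac_05/word_occurrences.py | get_format_width
-- ===== SOURCE A (Python) =====
-- def get_format_width(word_to_count):
--     """Get the width for formatting output."""
--     if len(word_to_count) > 0:
--         word_width = max(len(word) for word in word_to_count.keys())
--         count_width = max(len(str(count)) for count in word_to_count.values())
--     else:
--         word_width = 0
--         count_width = 0
--     return word_width, count_width
-- ===== SOURCE B (Python) =====
-- def digit_width(n):
--     """Length of str(n), computed arithmetically (sign + number of decimal digits)."""
--     width = 1 if n >= 0 else 2
--     n = abs(n)
--     while n >= 10: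
--         n //= 10
--         width += 1
--     return width
--
--
-- def get_format_width(word_to_count):
--     """Get the width for formatting output."""
--     word_width = max(map(len, word_to_count), default=0)
--     count_width = 0
--     if word_to_count:
--         counts = word_to_count.values()
--         count_width = max(digit_width(min(counts)), digit_width(max(counts)))
--     return word_width, count_width
-- ===== Notes on version B (the rewrite author's own statement) =====
-- stated objective: alternative
-- what changed: B never calls str() on the counts: it finds only min(counts) and max(counts) and computes the decimal width of just those two arithmetically (sign plus repeated division by 10), using that len(str(c)) is extremal at the extreme counts; word width uses max(map(len, keys), default=0) so the empty-dict guard applies only to counts.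
import Mathlib
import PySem

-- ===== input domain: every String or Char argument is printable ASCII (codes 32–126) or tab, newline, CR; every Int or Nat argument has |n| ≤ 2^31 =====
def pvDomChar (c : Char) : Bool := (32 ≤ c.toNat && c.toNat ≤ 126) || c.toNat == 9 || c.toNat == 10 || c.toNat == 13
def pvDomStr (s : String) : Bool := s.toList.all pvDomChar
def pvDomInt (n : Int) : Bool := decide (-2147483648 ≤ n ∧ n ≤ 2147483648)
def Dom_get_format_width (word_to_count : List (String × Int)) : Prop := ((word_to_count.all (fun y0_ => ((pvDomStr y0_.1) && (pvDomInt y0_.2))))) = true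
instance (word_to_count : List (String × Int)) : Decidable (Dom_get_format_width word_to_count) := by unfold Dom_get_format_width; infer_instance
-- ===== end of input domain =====

-- B avoids str() on counts: count width is computed arithmetically from only min(counts) and max(counts) (len(str(c)) is extremal at the extremes); objective: alternative.


-- ===== PORT A =====
def get_format_width (word_to_count : List (String × Int)) : Int × Int :=
  if word_to_count.length > 0 then
    let word_width :=
      match PySem.List.max? (word_to_count.map (fun p => PySem.Str.len p.1)) (fun y => y) with
      | some m => m
      | none => 0     -- unreachable: the list is nonempty under the guard
    let count_width :=
      match PySem.List.max? (word_to_count.map (fun p => PySem.Str.len (PySem.Int.toStr p.2))) (fun y => y) with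
      | some m => m
      | none => 0     -- unreachable
    (word_width, count_width)
  else
    (0, 0)

-- ===== PORT B =====
-- digit_width's while-loop: keep dividing by 10, incrementing the running width.
def digitWidthLoop (n : Nat) (w : Int) : Int :=
  if 10 ≤ n then digitWidthLoop (n / 10) (w + 1) else w
  termination_by n
  decreasing_by exact Nat.div_lt_self (by omega) (by omega)

-- digit_width(n): width = 1 if n >= 0 else 2; then the while-loop on abs(n).
def digitWidth (n : Int) : Int :=
  digitWidthLoop n.natAbs (if 0 ≤ n then 1 else 2)

def get_format_width_alt (word_to_count : List (String × Int)) : Int × Int :=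
  let word_width :=
    (PySem.List.max? (word_to_count.map (fun p => PySem.Str.len p.1)) (fun y => y)).getD 0
  let count_width :=
    if word_to_count ≠ [] then
      match PySem.List.min? (word_to_count.map (fun p => p.2)) (fun y => y),
            PySem.List.max? (word_to_count.map (fun p => p.2)) (fun y => y) with
      | some mn, some mx => max (digitWidth mn) (digitWidth mx)
      | _, _ => 0     -- unreachable: the list is nonempty under the guard
    else 0
  (word_width, count_width)

-- ===== PRECONDITION & SPEC =====
def Spec_get_format_width (word_to_count : List (String × Int)) (out : Int × Int) : Prop := out = get_format_width_alt word_to_count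
instance (word_to_count : List (String × Int)) (out : Int × Int) : Decidable (Spec_get_format_width word_to_count out) := by unfold Spec_get_format_width; infer_instance

-- ===== CLAIM (what is proved, stated in full; the proofs are below) =====
def Claim_equal_get_format_width : Prop := ∀ (word_to_count : List (String × Int)), Dom_get_format_width word_to_count → Spec_get_format_width word_to_count (get_format_width word_to_count)

-- ===== LEMMAS AND PROOFS =====

-- Number of extra decimal digits of n beyond the first (proof-side mirror of the while-loop).
def pvExtra (n : Nat) : Nat :=
  if 10 ≤ n then pvExtra (n / 10) + 1 else 0
  termination_by n
  decreasing_by exact Nat.div_lt_self (by omega) (by omega)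

theorem digitWidthLoop_eq (n : Nat) (w : Int) : digitWidthLoop n w = w + pvExtra n := by
  fun_induction digitWidthLoop n w with
  | case1 n w h ih =>
      rw [ih, show pvExtra n = pvExtra (n / 10) + 1 from by rw [pvExtra, if_pos h]]
      push_cast; ring
  | case2 n w h => rw [pvExtra, if_neg h]; simp

theorem toDigitsCore_len (f : Nat) : ∀ (n : Nat) (l : List Char), n < f →
    (Nat.toDigitsCore 10 f n l).length = pvExtra n + 1 + l.length := by
  induction f with
  | zero => intro n l h; omega
  | succ f ih =>
      intro n l h
      rw [Nat.toDigitsCore]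
      by_cases h10 : n / 10 = 0
      · have : ¬ 10 ≤ n := by omega
        simp [h10, pvExtra, this]
        omega
      · have hge : 10 ≤ n := by
          by_contra hc
          exact h10 (Nat.div_eq_of_lt (by omega))
        have hlt : n / 10 < f := by
          have := Nat.div_lt_self (show 0 < n by omega) (show 1 < 10 by omega)
          omega
        simp only [h10, ite_false]
        rw [ih (n / 10) _ hlt,
            show pvExtra n = pvExtra (n / 10) + 1 from by rw [pvExtra, if_pos hge]]
        simp
        omega

theorem len_toStr (c : Int) : PySem.Str.len (PySem.Int.toStr c) = digitWidth c := by
  have hchars : (PySem.Int.toStr c).toList = PySem.Int.toChars c := PySem.Int.toList_toStr c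
  rw [PySem.Str.len_eq, hchars, PySem.Int.toChars, digitWidth, digitWidthLoop_eq]
  by_cases hc : c < 0
  · have h0 : ¬ 0 ≤ c := by omega
    simp only [hc, if_pos, h0, if_neg, ite_true, ite_false, List.length_cons]
    rw [Nat.toDigits, toDigitsCore_len (c.natAbs + 1) c.natAbs [] (by omega)]
    rw [List.length_nil]; push_cast; ring
  · have h0 : 0 ≤ c := by omega
    have hn : c.toNat = c.natAbs := by omega
    simp only [hc, ite_false, h0]
    rw [Nat.toDigits, hn, toDigitsCore_len (c.natAbs + 1) c.natAbs [] (by omega)]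
    rw [List.length_nil]; push_cast; ring

theorem pvExtra_mono : ∀ (b a : Nat), a ≤ b → pvExtra a ≤ pvExtra b := by
  intro b
  induction b using Nat.strong_induction_on with
  | _ b ih =>
      intro a hab
      by_cases hb : 10 ≤ b
      · by_cases ha : 10 ≤ a
        · rw [show pvExtra a = pvExtra (a / 10) + 1 from by rw [pvExtra, if_pos ha],
              show pvExtra b = pvExtra (b / 10) + 1 from by rw [pvExtra, if_pos hb]]
          have hlt : b / 10 < b := Nat.div_lt_self (by omega) (by omega)
          have := ih (b / 10) hlt (a / 10) (Nat.div_le_div_right hab)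
          omega
        · rw [pvExtra, if_neg ha]; omega
      · have ha : ¬ 10 ≤ a := by omega
        rw [pvExtra, if_neg ha, pvExtra, if_neg hb]

theorem digitWidth_mono_pos {a b : Int} (h0 : 0 ≤ a) (hab : a ≤ b) :
    digitWidth a ≤ digitWidth b := by
  rw [digitWidth, digitWidth, digitWidthLoop_eq, digitWidthLoop_eq]
  have h0b : 0 ≤ b := le_trans h0 hab
  have : a.natAbs ≤ b.natAbs := by omega
  have := pvExtra_mono b.natAbs a.natAbs this
  simp only [h0, if_pos, h0b]
  omega

theorem digitWidth_mono_neg {a b : Int} (hab : a ≤ b) (hb : b < 0) :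
    digitWidth b ≤ digitWidth a := by
  rw [digitWidth, digitWidth, digitWidthLoop_eq, digitWidthLoop_eq]
  have ha : a < 0 := by omega
  have : b.natAbs ≤ a.natAbs := by omega
  have := pvExtra_mono a.natAbs b.natAbs this
  have h1 : ¬ 0 ≤ a := by omega
  have h2 : ¬ 0 ≤ b := by omega
  simp only [h1, h2, ite_false]
  omega

theorem get_format_width_spec : Claim_equal_get_format_width := by
  intro w _
  unfold Spec_get_format_width get_format_width get_format_width_alt
  cases w with
  | nil => rfl
  | cons h t =>
      set w := h :: t with hw
      have hne : w ≠ [] := by simp [hw]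
      simp only [hw ▸ (by simp : (h :: t).length > 0), if_pos, hne, ne_eq, not_false_iff]
      -- word side: match = getD
      have hword : ∀ (o : Option Int),
          (match o with | some m => m | none => (0:Int)) = o.getD 0 := by
        intro o; cases o <;> rfl
      -- count side
      obtain ⟨m, hm⟩ : ∃ m, PySem.List.max? (w.map (fun p => PySem.Str.len (PySem.Int.toStr p.2))) (fun y => y) = some m := by
        cases ho : PySem.List.max? (w.map (fun p => PySem.Str.len (PySem.Int.toStr p.2))) (fun y => y) with
        | none => exact absurd ((PySem.List.max?_eq_none_iff _ _).1 ho) (by simp [hw])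
        | some m => exact ⟨m, rfl⟩
      obtain ⟨mn, hmn⟩ : ∃ mn, PySem.List.min? (w.map (fun p => p.2)) (fun y => y) = some mn := by
        cases ho : PySem.List.min? (w.map (fun p => p.2)) (fun y => y) with
        | none => exact absurd ((PySem.List.min?_eq_none_iff _ _).1 ho) (by simp [hw])
        | some mn => exact ⟨mn, rfl⟩
      obtain ⟨mx, hmx⟩ : ∃ mx, PySem.List.max? (w.map (fun p => p.2)) (fun y => y) = some mx := by
        cases ho : PySem.List.max? (w.map (fun p => p.2)) (fun y => y) with
        | none => exact absurd ((PySem.List.max?_eq_none_iff _ _).1 ho) (by simp [hw])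
        | some mx => exact ⟨mx, rfl⟩
      rw [hm, hmn, hmx]
      refine Prod.ext (hword _) ?_
      -- prove m = max (digitWidth mn) (digitWidth mx)
      have hmem := PySem.List.max?_mem hm
      obtain ⟨p, hp, hpm⟩ := List.mem_map.1 hmem
      have hmnmem := PySem.List.min?_mem hmn
      have hmxmem := PySem.List.max?_mem hmx
      obtain ⟨pn, hpn, hpn2⟩ := List.mem_map.1 hmnmem
      obtain ⟨px, hpx, hpx2⟩ := List.mem_map.1 hmxmem
      apply le_antisymm
      · -- m ≤ max: m = len(str p.2) = digitWidth p.2, and mn ≤ p.2 ≤ mx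
        rw [← hpm, len_toStr]
        have h1 : mn ≤ p.2 := PySem.List.min?_isMin hmn _ (List.mem_map_of_mem hp)
        have h2 : p.2 ≤ mx := PySem.List.max?_isMax hmx _ (List.mem_map_of_mem hp)
        by_cases hs : 0 ≤ p.2
        · exact le_max_of_le_right (digitWidth_mono_pos hs h2)
        · exact le_max_of_le_left (digitWidth_mono_neg h1 (by omega))
      · -- max ≤ m: digitWidth mn and digitWidth mx are both values len(str ·) in the list
        have hub := PySem.List.max?_isMax hm
        apply max_le
        · have : PySem.Str.len (PySem.Int.toStr pn.2) ∈
              w.map (fun p => PySem.Str.len (PySem.Int.toStr p.2)) := List.mem_map_of_mem hpn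
          have := hub _ this
          rw [len_toStr, hpn2] at this
          exact this
        · have : PySem.Str.len (PySem.Int.toStr px.2) ∈
              w.map (fun p => PySem.Str.len (PySem.Int.toStr p.2)) := List.mem_map_of_mem hpx
          have := hub _ this
          rw [len_toStr, hpx2] at this
          exact this
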